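-- pv_equiv track=rewrite | github.com/AdirB100/CS1001.py-HW | HW5/hw5_sol.py | prefix_suffix_overlap_hash2
-- ===== SOURCE A (Python) =====
-- def prefix_suffix_overlap_hash2(lst, k):
--     sol_lst = []
--     n = len(lst)
--     d = {}
--     for i in range(n):
--         reisha = lst[i][:k]
--         if reisha not in d:
--             d[reisha] = [i]
--         else:
--             d[reisha].append(i)
--     for j in range(n):
--         seifa = lst[j][-k:]
--         if seifa in d:
--             vals = d[seifa]
--             for x in vals:
--                 if x != j:
--                     sol_lst.append((x, j))
--     return sol_lst
-- ===== SOURCE B (Python) =====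
-- def prefix_suffix_overlap_hash2(lst, k):
--     n = len(lst)
--     res = []
--     for j in range(n):
--         for x in range(n):
--             if x != j and lst[x][:k] == lst[j][-k:]:
--                 res.append((x, j))
--     return res
-- ===== Notes on version B (the rewrite author's own statement) =====
-- stated objective: simpler
-- what changed: Replaces the two-phase hash-grouping (build a prefix->indices dict, then look up each suffix) with a single direct double loop that tests the prefix/suffix slice equality pairwise; same output order since the dict's value lists hold indices in increasing order.
import Mathlib
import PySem

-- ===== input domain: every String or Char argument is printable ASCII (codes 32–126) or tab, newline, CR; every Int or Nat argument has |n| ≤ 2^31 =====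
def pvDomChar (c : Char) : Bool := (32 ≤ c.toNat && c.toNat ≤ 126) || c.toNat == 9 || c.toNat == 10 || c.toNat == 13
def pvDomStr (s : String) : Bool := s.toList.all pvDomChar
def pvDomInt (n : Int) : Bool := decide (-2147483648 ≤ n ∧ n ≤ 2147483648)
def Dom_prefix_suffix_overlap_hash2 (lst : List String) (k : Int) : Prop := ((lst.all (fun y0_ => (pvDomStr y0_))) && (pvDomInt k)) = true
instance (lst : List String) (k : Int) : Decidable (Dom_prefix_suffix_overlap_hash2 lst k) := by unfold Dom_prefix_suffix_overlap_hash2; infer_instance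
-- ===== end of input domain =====

-- B replaces A's two-phase prefix-dict grouping with a direct pairwise double loop (simpler, same O(n^2) worst case).


-- ===== PORT A =====
-- shared slice helpers: lst[i][:k] and lst[j][-k:], exactly Python's slicing
def psoPref (lst : List String) (k i : Int) : List Char :=
  PySem.List.slice (PySem.List.pyGetD lst i "").toList none (some k)
def psoSuff (lst : List String) (k j : Int) : List Char :=
  PySem.List.slice (PySem.List.pyGetD lst j "").toList (some (-k)) none

-- first loop of A: group indices by their k-prefix
def psoBuild (lst : List String) (k : Int) : PySem.Dict (List Char) (List Int) :=
  (PySem.List.pyRange 0 (lst.length : Int) 1).foldl (fun d i =>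
    let reisha := psoPref lst k i
    match d.get? reisha with
    | none => d.insert reisha [i]
    | some v => d.insert reisha (v ++ [i])) PySem.Dict.empty

def prefix_suffix_overlap_hash2 (lst : List String) (k : Int) : List (Int × Int) :=
  let d := psoBuild lst k
  (PySem.List.pyRange 0 (lst.length : Int) 1).foldl (fun sol j =>
    let seifa := psoSuff lst k j
    match d.get? seifa with
    | none => sol
    | some vals => vals.foldl (fun s x => if x ≠ j then s ++ [(x, j)] else s) sol) []

-- ===== PORT B =====
def prefix_suffix_overlap_hash2_alt (lst : List String) (k : Int) : List (Int × Int) :=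
  let r := PySem.List.pyRange 0 (lst.length : Int) 1
  r.foldl (fun res j =>
    r.foldl (fun res x =>
      if x ≠ j ∧ psoPref lst k x = psoSuff lst k j then res ++ [(x, j)] else res) res) []

-- ===== PRECONDITION & SPEC =====
def Spec_prefix_suffix_overlap_hash2 (lst : List String) (k : Int) (out : List (Int × Int)) : Prop := out = prefix_suffix_overlap_hash2_alt lst k
instance (lst : List String) (k : Int) (out : List (Int × Int)) : Decidable (Spec_prefix_suffix_overlap_hash2 lst k out) := by unfold Spec_prefix_suffix_overlap_hash2; infer_instance

-- ===== CLAIM (what is proved, stated in full; the proofs are below) =====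
def Claim_equal_prefix_suffix_overlap_hash2 : Prop := ∀ (lst : List String) (k : Int), Dom_prefix_suffix_overlap_hash2 lst k → Spec_prefix_suffix_overlap_hash2 lst k (prefix_suffix_overlap_hash2 lst k)

-- ===== LEMMAS AND PROOFS =====

-- merge of an optional old value list with newly collected indices
def psoMerge (o : Option (List Int)) (xs : List Int) : Option (List Int) :=
  match o, xs with
  | none, [] => none
  | o, xs => some (o.getD [] ++ xs)

theorem psoMerge_nil (o : Option (List Int)) : psoMerge o [] = o := by
  cases o <;> simp [psoMerge]

-- characterisation of the dict built by A's first loop, for an arbitrary index list and start dict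
theorem psoBuild_get (lst : List String) (k : Int) (L : List Int)
    (d0 : PySem.Dict (List Char) (List Int)) (s : List Char) :
    (L.foldl (fun d i =>
      let reisha := psoPref lst k i
      match d.get? reisha with
      | none => d.insert reisha [i]
      | some v => d.insert reisha (v ++ [i])) d0).get? s
    = psoMerge (d0.get? s) (L.filter (fun i => psoPref lst k i == s)) := by
  induction L generalizing d0 with
  | nil => simp [psoMerge_nil]
  | cons i L ih =>
    simp only [List.foldl_cons, List.filter_cons]
    rw [ih]
    by_cases h : psoPref lst k i = s
    · subst h
      simp only [beq_self_eq_true, if_pos]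
      cases hd : d0.get? (psoPref lst k i) with
      | none =>
        simp only [PySem.Dict.get?_insert_self]
        cases L.filter (fun j => psoPref lst k j == psoPref lst k i) <;>
          simp [psoMerge]
      | some v =>
        simp only [PySem.Dict.get?_insert_self]
        cases L.filter (fun j => psoPref lst k j == psoPref lst k i) <;>
          simp [psoMerge]
    · have hb : (psoPref lst k i == s) = false := by simp [h]
      simp only [hb, Bool.false_eq_true, if_false]
      cases hd : d0.get? (psoPref lst k i) <;>
        simp [PySem.Dict.get?_insert_of_ne _ _ (fun hc => h hc.symm)]

-- A's second loop processes each j exactly as B's inner loop does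
theorem psoStep_eq (lst : List String) (k : Int) (sol : List (Int × Int)) (j : Int) :
    (let seifa := psoSuff lst k j
     match (psoBuild lst k).get? seifa with
     | none => sol
     | some vals => vals.foldl (fun s x => if x ≠ j then s ++ [(x, j)] else s) sol)
    = (PySem.List.pyRange 0 (lst.length : Int) 1).foldl (fun res x =>
        if x ≠ j ∧ psoPref lst k x = psoSuff lst k j then res ++ [(x, j)] else res) sol := by
  have hB : (PySem.List.pyRange 0 (lst.length : Int) 1).foldl (fun res x =>
        if x ≠ j ∧ psoPref lst k x = psoSuff lst k j then res ++ [(x, j)] else res) sol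
      = sol ++ ((PySem.List.pyRange 0 (lst.length : Int) 1).filter
          (fun x => decide (x ≠ j ∧ psoPref lst k x = psoSuff lst k j))).map (fun x => (x, j)) := by
    rw [PySem.List.foldl_append_ite]
  have hget := psoBuild_get lst k (PySem.List.pyRange 0 (lst.length : Int) 1)
      PySem.Dict.empty (psoSuff lst k j)
  have hfilter : ((PySem.List.pyRange 0 (lst.length : Int) 1).filter
          (fun i => psoPref lst k i == psoSuff lst k j)).filter (fun x => x ≠ j)
      = (PySem.List.pyRange 0 (lst.length : Int) 1).filter
          (fun x => decide (x ≠ j ∧ psoPref lst k x = psoSuff lst k j)) := by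
    rw [List.filter_filter]
    apply List.filter_congr
    intro x _
    by_cases h1 : x = j <;> by_cases h2 : psoPref lst k x = psoSuff lst k j <;>
      simp [h1, h2]
  simp only [psoBuild] at *
  rw [hB, hget]
  cases hf : (PySem.List.pyRange 0 (lst.length : Int) 1).filter
      (fun i => psoPref lst k i == psoSuff lst k j) with
  | nil =>
    simp only [PySem.Dict.get?_empty, psoMerge]
    rw [← hfilter, hf]
    simp
  | cons a L =>
    simp only [PySem.Dict.get?_empty, psoMerge]
    rw [PySem.List.foldl_append_ite, ← hfilter, hf]
    simp

-- ===== VERDICT (by name: the statement is the Claim_ definition above) =====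
theorem prefix_suffix_overlap_hash2_spec : Claim_equal_prefix_suffix_overlap_hash2 := by
  intro lst k _
  unfold Spec_prefix_suffix_overlap_hash2 prefix_suffix_overlap_hash2 prefix_suffix_overlap_hash2_alt
  apply PySem.List.foldl_congr_mem
  intro sol j _
  exact psoStep_eq lst k sol j
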